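-- pv_equiv track=rewrite | github.com/JaneliaSciComp/tensorswitch | src/tensorswitch_v2/readers/nd2.py | _infer_dimension_names
-- ===== SOURCE A (Python) =====
-- def _infer_dimension_names(shape):
--     """Infer dimension names from array shape."""
--     ndim = len(shape)
--     if ndim == 3:
--         return ['z', 'y', 'x']
--     elif ndim == 4:
--         return ['c', 'z', 'y', 'x']
--     elif ndim == 5:
--         return ['t', 'c', 'z', 'y', 'x']
--     else:
--         return [f'dim_{i}' for i in range(ndim)]
-- ===== SOURCE B (Python) =====
-- def _infer_dimension_names(shape):
--     """Infer dimension names from array shape."""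
--     # Pair axis names with the shape back-to-front; zip truncates, so the
--     # pairing is complete iff ndim <= 5.
--     paired = [name for name, _ in zip(('x', 'y', 'z', 'c', 't'), reversed(list(shape)))]
--     if len(paired) == len(shape) and len(paired) >= 3:
--         paired.reverse()
--         return paired
--     return ['dim_%d' % i for i in range(len(shape))]
-- ===== Notes on version B (the rewrite author's own statement) =====
-- stated objective: alternative
-- what changed: Instead of branching on ndim to pick a hard-coded name list, B zips a back-to-front axis-name sequence ('x','y','z','c','t') against the reversed shape, deriving both the names and the applicability test (the zip pairing is complete iff ndim <= 5) from the pairing itself, then reverses the accumulated names.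
import Mathlib
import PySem

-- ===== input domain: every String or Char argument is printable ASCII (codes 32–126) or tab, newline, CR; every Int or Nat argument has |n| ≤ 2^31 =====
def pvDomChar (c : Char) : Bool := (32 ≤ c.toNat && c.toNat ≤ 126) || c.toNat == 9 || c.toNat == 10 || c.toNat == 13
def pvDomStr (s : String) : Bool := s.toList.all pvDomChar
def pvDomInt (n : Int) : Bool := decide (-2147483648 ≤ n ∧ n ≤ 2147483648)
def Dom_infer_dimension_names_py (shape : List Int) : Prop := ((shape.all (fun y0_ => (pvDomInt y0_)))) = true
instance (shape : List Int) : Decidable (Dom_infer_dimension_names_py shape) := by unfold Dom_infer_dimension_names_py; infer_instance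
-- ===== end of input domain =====

-- ===== PORT A =====
-- Port of A: three explicit branches on len(shape), else a dim_i comprehension.
def infer_dimension_names_py (shape : List Int) : List String :=
  let ndim : Int := shape.length
  if ndim == 3 then ["z", "y", "x"]
  else if ndim == 4 then ["c", "z", "y", "x"]
  else if ndim == 5 then ["t", "c", "z", "y", "x"]
  else (PySem.List.pyRange 0 ndim 1).map (fun i => "dim_" ++ PySem.Int.toStr i)

-- ===== PORT B =====
-- Port of B: zip axis names against the reversed shape (zip truncates), accept iff the
-- pairing is complete and has at least 3 names, then reverse; else the dim_i comprehension.
def infer_dimension_names_py_alt (shape : List Int) : List String :=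
  let paired : List String := ((["x", "y", "z", "c", "t"].zip shape.reverse).map Prod.fst)
  if paired.length = shape.length ∧ 3 ≤ paired.length then paired.reverse
  else (PySem.List.pyRange 0 (shape.length : Int) 1).map (fun i => "dim_" ++ PySem.Int.toStr i)

-- ===== PRECONDITION & SPEC =====
def Spec_infer_dimension_names_py (shape : List Int) (out : List String) : Prop := out = infer_dimension_names_py_alt shape
instance (shape : List Int) (out : List String) : Decidable (Spec_infer_dimension_names_py shape out) := by unfold Spec_infer_dimension_names_py; infer_instance

-- ===== CLAIM =====
def Claim_equal_infer_dimension_names_py : Prop := ∀ (shape : List Int), Dom_infer_dimension_names_py shape → Spec_infer_dimension_names_py shape (infer_dimension_names_py shape)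

-- ===== LEMMAS AND PROOFS =====
theorem pv_map_fst_zip_eq_take {α β : Type} (l1 : List α) (l2 : List β) :
    (l1.zip l2).map Prod.fst = l1.take l2.length := by
  induction l1 generalizing l2 with
  | nil => simp
  | cons a t ih => cases l2 <;> simp [ih]

-- ===== VERDICT =====
theorem infer_dimension_names_py_spec : Claim_equal_infer_dimension_names_py := by
  intro shape _
  unfold Spec_infer_dimension_names_py infer_dimension_names_py infer_dimension_names_py_alt
  rw [pv_map_fst_zip_eq_take, List.length_reverse]
  by_cases h3 : shape.length = 3
  · simp [h3]
  · by_cases h4 : shape.length = 4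
    · simp [h4]
    · by_cases h5 : shape.length = 5
      · simp [h5]
      · have hlen : (["x", "y", "z", "c", "t"].take shape.length).length
            = min 5 shape.length := by simp [Nat.min_comm]
        have hg : ¬ ((["x", "y", "z", "c", "t"].take shape.length).length = shape.length
            ∧ 3 ≤ (["x", "y", "z", "c", "t"].take shape.length).length) := by
          rw [hlen]; omega
        rw [if_neg (by simp; omega), if_neg (by simp; omega),
            if_neg (by simp; omega), if_neg hg]
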